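-- pv_equiv track=rewrite | github.com/pfptcommunity/sma2ldif | src/sma2ldif.py | split_targets
-- ===== SOURCE A (Python) =====
-- from typing import Dict, List, Set, Optional, Tuple
--
-- def split_targets(target_str: str) -> List[str]:
--     """Split alias targets by commas, preserving quoted strings."""
--     targets = []
--     current = ''
--     in_quotes = False
--     i = 0
--     while i < len(target_str):
--         char = target_str[i]
--         if char == '"' and (i == 0 or target_str[i - 1] != '\\'):
--             in_quotes = not in_quotes
--             current += char
--         elif char == ',' and not in_quotes:
--             if current.strip():
--                 targets.append(current.strip())
--             current = ''
--         else:
--             current += char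
--         i += 1
--     if current.strip():
--         targets.append(current.strip())
--     return targets
-- ===== SOURCE B (Python) =====
-- from typing import List
--
--
-- def split_targets(target_str: str) -> List[str]:
--     """Split alias targets by commas, preserving quoted strings."""
--     # Pass 1: collect the indices of splitting commas (unquoted ones).
--     cuts = []
--     in_quotes = False
--     prev = None
--     for i, ch in enumerate(target_str):
--         if ch == '"' and prev != '\\':
--             in_quotes = not in_quotes
--         elif ch == ',' and not in_quotes:
--             cuts.append(i)
--         prev = ch
--     # Pass 2: slice the string at those indices.
--     starts = [0] + [c + 1 for c in cuts]
--     ends = cuts + [len(target_str)]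
--     pieces = [target_str[a:b] for a, b in zip(starts, ends)]
--     # Pass 3: strip and drop empty segments.
--     return [t for t in (p.strip() for p in pieces) if t]
-- ===== Notes on version B (the rewrite author's own statement) =====
-- stated objective: faster
-- what changed: Replaces A's single pass that grows a `current` string char-by-char (quadratic string concatenation per segment) and strips/filters inside the loop with three separate passes: collect the indices of unquoted commas, slice the string at those boundaries, then strip and drop empty pieces.
import Mathlib
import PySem

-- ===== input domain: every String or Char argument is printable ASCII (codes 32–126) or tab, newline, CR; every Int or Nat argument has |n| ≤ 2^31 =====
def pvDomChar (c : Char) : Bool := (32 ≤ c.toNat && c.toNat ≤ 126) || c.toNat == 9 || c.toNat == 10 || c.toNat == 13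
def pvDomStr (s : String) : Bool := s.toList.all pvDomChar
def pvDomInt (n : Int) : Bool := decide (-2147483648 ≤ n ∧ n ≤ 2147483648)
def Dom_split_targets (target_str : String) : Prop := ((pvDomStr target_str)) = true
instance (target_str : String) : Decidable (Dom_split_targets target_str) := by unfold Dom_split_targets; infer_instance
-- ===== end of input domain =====

-- B replaces A's char-by-char buffer accumulation with three passes (collect unquoted-comma
-- indices, slice at them, strip-and-filter); objective: faster (no per-char string concatenation).

-- ===== PORT A =====
-- A's while-loop over indices; target_str[i-1] is carried as `prev` (the loop is left-to-right).
def splitTargetsLoopA (rest : List Char) (prev : Option Char) (targets : List (List Char))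
    (current : List Char) (inq : Bool) : List (List Char) :=
  match rest with
  | [] => if PySem.Chars.strip current ≠ [] then targets ++ [PySem.Chars.strip current] else targets
  | c :: rs =>
    if c = '"' ∧ prev ≠ some '\\' then
      splitTargetsLoopA rs (some c) targets (current ++ [c]) (!inq)
    else if c = ',' ∧ inq = false then
      splitTargetsLoopA rs (some c)
        (if PySem.Chars.strip current ≠ [] then targets ++ [PySem.Chars.strip current] else targets)
        [] inq
    else
      splitTargetsLoopA rs (some c) targets (current ++ [c]) inq

def split_targets (target_str : String) : List String :=
  (splitTargetsLoopA target_str.toList none [] [] false).map String.mk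

-- ===== PORT B =====
-- enumerate(target_str) starting at index i
def enumFromB (i : Nat) : List Char → List (Nat × Char)
  | [] => []
  | c :: rs => (i, c) :: enumFromB (i + 1) rs

-- pass 1: indices of unquoted commas
def cutsLoopB (xs : List (Nat × Char)) (prev : Option Char) (inq : Bool) (cuts : List Nat) : List Nat :=
  match xs with
  | [] => cuts
  | (i, c) :: rs =>
    if c = '"' ∧ prev ≠ some '\\' then cutsLoopB rs (some c) (!inq) cuts
    else if c = ',' ∧ inq = false then cutsLoopB rs (some c) inq (cuts ++ [i])
    else cutsLoopB rs (some c) inq cuts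

def split_targets_alt (target_str : String) : List String :=
  let cs := target_str.toList
  let cuts := cutsLoopB (enumFromB 0 cs) none false []
  let starts := 0 :: cuts.map (· + 1)
  let ends := cuts ++ [cs.length]
  -- target_str[a:b]: both bounds here are nonnegative and a ≤ len, so the slice is drop/take (exact)
  let pieces := (starts.zip ends).map (fun p => (cs.drop p.1).take (p.2 - p.1))
  ((pieces.map PySem.Chars.strip).filter (· ≠ [])).map String.mk

-- ===== PRECONDITION & SPEC =====
def Spec_split_targets (target_str : String) (out : List String) : Prop := out = split_targets_alt target_str
instance (target_str : String) (out : List String) : Decidable (Spec_split_targets target_str out) := by unfold Spec_split_targets; infer_instance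

-- ===== CLAIM (what is proved, stated in full; the proofs are below) =====
def Claim_equal_split_targets : Prop := ∀ (target_str : String), Dom_split_targets target_str → Spec_split_targets target_str (split_targets target_str)

-- ===== LEMMAS AND PROOFS =====

/-- Prepend a char to the first segment (creating it if none). -/
def consHead (c : Char) : List (List Char) → List (List Char)
  | [] => [[c]]
  | h :: t => (c :: h) :: t

/-- The raw segments of `rest` split at its unquoted commas, given loop state. -/
def segs (rest : List Char) (prev : Option Char) (inq : Bool) : List (List Char) :=
  match rest with
  | [] => [[]]
  | c :: rs =>
    if c = '"' ∧ prev ≠ some '\\' then consHead c (segs rs (some c) (!inq))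
    else if c = ',' ∧ inq = false then [] :: segs rs (some c) inq
    else consHead c (segs rs (some c) inq)

def mapHead (f : List Char → List Char) : List (List Char) → List (List Char)
  | [] => []
  | h :: t => f h :: t

def fsStrip (l : List (List Char)) : List (List Char) :=
  (l.map PySem.Chars.strip).filter (· ≠ [])

/-- piecesFrom cs s0 cuts: the successive slices of cs from s0 cut at the given indices. -/
def piecesFrom (cs : List Char) (s0 : Nat) : List Nat → List (List Char)
  | [] => [(cs.drop s0).take (cs.length - s0)]
  | c :: rest => (cs.drop s0).take (c - s0) :: piecesFrom cs (c + 1) rest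

theorem mapHead_nil_append (l : List (List Char)) :
    mapHead (([] : List Char) ++ ·) l = l := by
  cases l <;> simp [mapHead]

theorem consHead_ne_nil (c : Char) (l : List (List Char)) : consHead c l ≠ [] := by
  cases l <;> simp [consHead]

theorem segs_ne_nil (rest : List Char) (prev : Option Char) (inq : Bool) :
    segs rest prev inq ≠ [] := by
  cases rest with
  | nil => simp [segs]
  | cons c rs =>
    simp only [segs]
    split_ifs
    · exact consHead_ne_nil _ _
    · simp
    · exact consHead_ne_nil _ _

theorem loopA_eq (rest : List Char) (prev : Option Char) (targets : List (List Char))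
    (current : List Char) (inq : Bool) :
    splitTargetsLoopA rest prev targets current inq
      = targets ++ fsStrip (mapHead (current ++ ·) (segs rest prev inq)) := by
  induction rest generalizing prev targets current inq with
  | nil =>
    simp only [splitTargetsLoopA, segs, mapHead, fsStrip, List.map, List.filter,
      List.append_nil]
    split_ifs with h
    · simp [h]
    · simp at h; simp [h]
  | cons c rs ih =>
    simp only [splitTargetsLoopA, segs]
    split_ifs with h1 h2 h3
    · -- quote toggle
      rw [ih]
      obtain ⟨hh, ht, hS⟩ : ∃ hh ht, segs rs (some c) (!inq) = hh :: ht := by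
        cases hS : segs rs (some c) (!inq) with
        | nil => exact absurd hS (segs_ne_nil rs (some c) (!inq))
        | cons a b => exact ⟨a, b, rfl⟩
      simp [hS, consHead, mapHead]
    · -- unquoted comma, nonempty stripped segment
      rw [ih, mapHead_nil_append]
      simp [fsStrip, mapHead, h3]
    · -- unquoted comma, segment strips to empty
      rw [ih, mapHead_nil_append]
      simp only [ne_eq, Decidable.not_not] at h3
      simp [fsStrip, mapHead, h3]
    · -- plain char
      rw [ih]
      obtain ⟨hh, ht, hS⟩ : ∃ hh ht, segs rs (some c) inq = hh :: ht := by
        cases hS : segs rs (some c) inq with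
        | nil => exact absurd hS (segs_ne_nil rs (some c) inq)
        | cons a b => exact ⟨a, b, rfl⟩
      simp [hS, consHead, mapHead]

theorem cutsLoopB_acc (xs : List (Nat × Char)) (prev : Option Char) (inq : Bool) (cuts : List Nat) :
    cutsLoopB xs prev inq cuts = cuts ++ cutsLoopB xs prev inq [] := by
  induction xs generalizing prev inq cuts with
  | nil => simp [cutsLoopB]
  | cons p rs ih =>
    obtain ⟨i, c⟩ := p
    simp only [cutsLoopB, List.nil_append]
    split_ifs
    · rw [ih]
    · rw [ih (cuts := cuts ++ [i]), ih (cuts := [i])]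
      simp
    · rw [ih]

theorem cutsLoopB_ge (xs : List Char) (j : Nat) (prev : Option Char) (inq : Bool) :
    ∀ x ∈ cutsLoopB (enumFromB j xs) prev inq [], j ≤ x := by
  induction xs generalizing j prev inq with
  | nil => simp [enumFromB, cutsLoopB]
  | cons c rs ih =>
    intro x hx
    simp only [enumFromB, cutsLoopB, List.nil_append] at hx
    split_ifs at hx
    · exact le_trans (Nat.le_succ j) (ih (j + 1) (some c) (!inq) x hx)
    · rw [cutsLoopB_acc] at hx
      rcases List.mem_append.1 hx with h | h
      · simp at h; omega
      · exact le_trans (Nat.le_succ j) (ih (j + 1) (some c) inq x h)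
    · exact le_trans (Nat.le_succ j) (ih (j + 1) (some c) inq x hx)

theorem zip_pieces_eq (cs : List Char) (cuts : List Nat) (s0 : Nat) :
    ((s0 :: cuts.map (· + 1)).zip (cuts ++ [cs.length])).map
        (fun p => (cs.drop p.1).take (p.2 - p.1))
      = piecesFrom cs s0 cuts := by
  induction cuts generalizing s0 with
  | nil => simp [piecesFrom]
  | cons c rest ih => simp [piecesFrom, ih]

theorem pieces_eq_segs (rest : List Char) (cs : List Char) (j : Nat) (prev : Option Char)
    (inq : Bool) (hdrop : cs.drop j = rest) :
    piecesFrom cs j (cutsLoopB (enumFromB j rest) prev inq []) = segs rest prev inq := by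
  induction rest generalizing j prev inq with
  | nil =>
    simp [enumFromB, cutsLoopB, piecesFrom, segs, hdrop]
  | cons c rs ih =>
    have hjlen : j < cs.length := by
      by_contra h
      rw [List.drop_eq_nil_of_le (by omega)] at hdrop
      exact List.cons_ne_nil _ _ hdrop.symm
    have hdrop1 : cs.drop (j + 1) = rs := by
      have h1 : cs.drop (j + 1) = List.drop 1 (List.drop j cs) := by
        rw [List.drop_drop]
      rw [h1, hdrop]
      rfl
    have hcons : cs.drop j = c :: cs.drop (j + 1) := by rw [hdrop, hdrop1]
    simp only [enumFromB, cutsLoopB, List.nil_append, segs]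
    split_ifs with h1 h2
    · -- quote toggle: no cut at j
      rw [← ih (j + 1) (some c) (!inq) hdrop1]
      generalize hK : cutsLoopB (enumFromB (j + 1) rs) (some c) (!inq) [] = K
      cases K with
      | nil =>
        simp only [piecesFrom, consHead, hcons]
        rw [show cs.length - j = (cs.length - (j + 1)) + 1 by omega]
        simp
      | cons c0 K' =>
        have hc0 : j + 1 ≤ c0 := cutsLoopB_ge rs (j + 1) (some c) (!inq) c0 (by rw [hK]; simp)
        simp only [piecesFrom, consHead, hcons]
        rw [show c0 - j = (c0 - (j + 1)) + 1 by omega]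
        simp
    · -- cut at j
      rw [cutsLoopB_acc]
      simp only [List.singleton_append, piecesFrom, Nat.sub_self, List.take_zero]
      rw [ih (j + 1) (some c) inq hdrop1]
    · -- plain char: no cut at j
      rw [← ih (j + 1) (some c) inq hdrop1]
      generalize hK : cutsLoopB (enumFromB (j + 1) rs) (some c) inq [] = K
      cases K with
      | nil =>
        simp only [piecesFrom, consHead, hcons]
        rw [show cs.length - j = (cs.length - (j + 1)) + 1 by omega]
        simp
      | cons c0 K' =>
        have hc0 : j + 1 ≤ c0 := cutsLoopB_ge rs (j + 1) (some c) inq c0 (by rw [hK]; simp)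
        simp only [piecesFrom, consHead, hcons]
        rw [show c0 - j = (c0 - (j + 1)) + 1 by omega]
        simp

-- ===== VERDICT (by name: the statement is the Claim_ definition above) =====
theorem split_targets_spec : Claim_equal_split_targets := by
  intro target_str _
  unfold Spec_split_targets split_targets
  rw [loopA_eq, mapHead_nil_append, List.nil_append]
  dsimp only [split_targets_alt]
  rw [zip_pieces_eq, pieces_eq_segs target_str.toList target_str.toList 0 none false rfl]
  rfl
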